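-- pv_equiv track=rewrite | github.com/peytontolbert/model-stack | tensor/shard.py | act_partition_plan
-- ===== SOURCE A (Python) =====
-- def act_partition_plan(T: int, bytes_budget: int, bytes_per_token: int) -> list[int]:
--     # Simple equal chunks that satisfy budget
--     max_tokens = max(int(bytes_budget // max(bytes_per_token, 1)), 1)
--     parts = []
--     cur = 0
--     while cur < T:
--         parts.append(min(max_tokens, T - cur))
--         cur += parts[-1]
--     return parts
-- ===== SOURCE B (Python) =====
-- def act_partition_plan(T: int, bytes_budget: int, bytes_per_token: int) -> list[int]:
--     # Closed form: k full chunks of max_tokens plus an optional remainder chunk.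
--     max_tokens = max(bytes_budget // max(bytes_per_token, 1), 1)
--     if T <= 0:
--         return []
--     k, rem = divmod(T, max_tokens)
--     return [max_tokens] * k + ([rem] if rem else [])
-- ===== Notes on version B (the rewrite author's own statement) =====
-- stated objective: simpler
-- what changed: Replaced the subtraction loop with a closed-form divmod: k full chunks of max_tokens plus an optional remainder chunk.
import Mathlib
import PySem

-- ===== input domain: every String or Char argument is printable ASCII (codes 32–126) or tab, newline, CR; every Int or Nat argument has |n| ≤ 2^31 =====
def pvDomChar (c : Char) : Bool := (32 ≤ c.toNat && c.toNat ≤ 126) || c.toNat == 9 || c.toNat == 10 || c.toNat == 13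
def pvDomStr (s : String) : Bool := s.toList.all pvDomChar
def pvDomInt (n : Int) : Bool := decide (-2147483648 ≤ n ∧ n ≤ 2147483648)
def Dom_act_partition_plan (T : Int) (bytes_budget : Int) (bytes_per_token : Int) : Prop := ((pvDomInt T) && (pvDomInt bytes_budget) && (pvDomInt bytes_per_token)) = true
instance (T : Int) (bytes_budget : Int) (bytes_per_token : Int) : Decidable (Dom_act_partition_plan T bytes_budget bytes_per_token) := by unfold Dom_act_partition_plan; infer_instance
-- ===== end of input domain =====

-- B replaces A's subtraction loop by a closed-form divmod plan (simpler; same result).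


-- ===== PORT A =====
-- A's while loop: append min(max_tokens, T - cur) and advance cur.  hm : 1 ≤ m guarantees termination
def actLoopA (m : Int) (hm : 1 ≤ m) (T cur : Int) (parts : List Int) : List Int :=
  if _h : cur < T then
    actLoopA m hm T (cur + min m (T - cur)) (parts ++ [min m (T - cur)])
  else parts
termination_by (T - cur).toNat
decreasing_by omega

def act_partition_plan (T : Int) (bytes_budget : Int) (bytes_per_token : Int) : List Int :=
  actLoopA (max (PySem.Int.floordiv bytes_budget (max bytes_per_token 1)) 1)
    (le_max_right _ _) T 0 []

-- ===== PORT B =====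
def act_partition_plan_alt (T : Int) (bytes_budget : Int) (bytes_per_token : Int) : List Int :=
  let m := max (PySem.Int.floordiv bytes_budget (max bytes_per_token 1)) 1
  if T ≤ 0 then []
  else
    let k := PySem.Int.floordiv T m
    let rem := PySem.Int.mod T m
    List.replicate k.toNat m ++ (if rem = 0 then [] else [rem])

-- ===== PRECONDITION & SPEC =====
def Spec_act_partition_plan (T : Int) (bytes_budget : Int) (bytes_per_token : Int) (out : List Int) : Prop := out = act_partition_plan_alt T bytes_budget bytes_per_token
instance (T : Int) (bytes_budget : Int) (bytes_per_token : Int) (out : List Int) : Decidable (Spec_act_partition_plan T bytes_budget bytes_per_token out) := by unfold Spec_act_partition_plan; infer_instance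

-- ===== CLAIM (what is proved, stated in full; the proofs are below) =====
def Claim_equal_act_partition_plan : Prop := ∀ (T : Int) (bytes_budget : Int) (bytes_per_token : Int), Dom_act_partition_plan T bytes_budget bytes_per_token → Spec_act_partition_plan T bytes_budget bytes_per_token (act_partition_plan T bytes_budget bytes_per_token)

-- ===== LEMMAS AND PROOFS =====

-- the closed-form plan for a remaining amount r of tokens, chunk size m
def planOf (m r : Int) : List Int :=
  if r ≤ 0 then []
  else List.replicate (PySem.Int.floordiv r m).toNat m ++
       (if PySem.Int.mod r m = 0 then [] else [PySem.Int.mod r m])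

lemma planOf_step (m r : Int) (hm : 1 ≤ m) (hr : 0 < r) :
    planOf m r = min m r :: planOf m (r - min m r) := by
  rcases le_or_gt r m with hle | hgt
  · -- final (possibly partial) chunk: min = r, remaining 0
    have hmin : min m r = r := by omega
    rw [hmin, sub_self, planOf, if_neg (by omega), planOf, if_pos le_rfl,
        PySem.Int.floordiv_eq_ediv_of_pos (by omega), PySem.Int.mod_eq_emod_of_pos (by omega)]
    rcases eq_or_lt_of_le hle with heq | hlt
    · subst heq
      rw [Int.ediv_self (by omega : r ≠ 0), Int.emod_self]
      simp
    · rw [Int.ediv_eq_zero_of_lt (by omega) hlt, Int.emod_eq_of_lt (by omega) hlt,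
          if_neg hr.ne']
      simp
  · -- full chunk of size m
    have hmin : min m r = m := by omega
    have hm0 : (0:Int) < m := by omega
    simp only [hmin, planOf, if_neg (show ¬ r ≤ 0 by omega),
        if_neg (show ¬ r - m ≤ 0 by omega),
        PySem.Int.floordiv_eq_ediv_of_pos hm0, PySem.Int.mod_eq_emod_of_pos hm0]
    have hdiv : r / m = (r - m) / m + 1 := by
      conv_lhs => rw [(by ring : r = (r - m) + 1 * m)]
      rw [Int.add_mul_ediv_right _ _ (by omega : m ≠ 0)]
    have hmod : r % m = (r - m) % m := by
      conv_lhs => rw [(by ring : r = (r - m) + m * 1)]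
      exact Int.add_mul_emod_self_left (r - m) m 1
    have hd0 : 0 ≤ (r - m) / m := Int.ediv_nonneg (by omega) (by omega)
    rw [hdiv, hmod, (by omega : ((r - m) / m + 1).toNat = ((r - m) / m).toNat + 1),
        List.replicate_succ]
    simp

lemma actLoopA_eq (m : Int) (hm : 1 ≤ m) (T cur : Int) (parts : List Int) :
    actLoopA m hm T cur parts = parts ++ planOf m (T - cur) := by
  by_cases h : cur < T
  · rw [actLoopA, dif_pos h, actLoopA_eq m hm T (cur + min m (T - cur)),
        planOf_step m (T - cur) hm (by omega),
        (by omega : T - (cur + min m (T - cur)) = (T - cur) - min m (T - cur))]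
    simp
  · rw [actLoopA, dif_neg h, planOf, if_pos (by omega)]
    simp
termination_by (T - cur).toNat
decreasing_by omega

theorem act_partition_plan_eq_alt (T bytes_budget bytes_per_token : Int) :
    act_partition_plan T bytes_budget bytes_per_token
      = act_partition_plan_alt T bytes_budget bytes_per_token := by
  unfold act_partition_plan act_partition_plan_alt
  rw [actLoopA_eq, List.nil_append, sub_zero, planOf]

-- ===== VERDICT (by name: the statement is the Claim_ definition above) =====
theorem act_partition_plan_spec : Claim_equal_act_partition_plan := by
  intro T bb bpt _
  exact act_partition_plan_eq_alt T bb bpt
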